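-- pv_equiv track=rewrite | github.com/Checkmk/checkmk | cmk/plugins/collection/agent_based/cisco_temperature.py | _get_contained_sensor_ids
-- ===== SOURCE A (Python) =====
-- from collections.abc import Mapping, MutableMapping, Sequence
--
-- def _get_child_contained_sensor_ids(sensor_id: str, container: Mapping[str, set[str]]) -> set[str]:
--     children = {sensor_id}
--     for child in container.get(sensor_id, []):
--         children.update(_get_child_contained_sensor_ids(child, container))
--         children.add(child)
--     return children
--
-- def _get_contained_sensor_ids(
--     sensor_oid: str, admin_state_ids: set[str], container: Mapping[str, set[str]]
-- ) -> set[str]: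
--     # different cisco systems have different ways how containers work/where the admin state is set
--     to_add_status_to = set()
--     for container_id, sensors in container.items():
--         if sensor_oid in sensors:
--             # if the admin state is set for a sensor within a container where other sensors also
--             # have an admin state set -> apply status only to children
--             if len(sensors.intersection(admin_state_ids)) > 1:
--                 to_add_status_to.update(_get_child_contained_sensor_ids(sensor_oid, container))
--             else:
--                 # admin state is set only for one sensor within container
--                 # -> apply status to all sensors
--                 to_add_status_to.update(container_id)
--                 for sensor in sensors:
--                     to_add_status_to.update(_get_child_contained_sensor_ids(sensor, container))
--     return to_add_status_to
-- ===== SOURCE B (Python) =====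
-- def _get_contained_sensor_ids(sensor_oid, admin_state_ids, container):
--     # Iterative DFS with an explicit stack and a per-container visited set,
--     # instead of A's unbounded recursive re-expansion of the containment graph.
--     to_add_status_to = set()
--     for container_id, sensors in container.items():
--         if sensor_oid not in sensors:
--             continue
--         if len(sensors.intersection(admin_state_ids)) > 1:
--             stack = [sensor_oid]
--         else:
--             to_add_status_to.update(container_id)
--             stack = list(sensors)[::-1]
--         seen = set()
--         while stack:
--             x = stack.pop()
--             if x in seen:
--                 continue
--             seen.add(x)
--             to_add_status_to.add(x)
--             stack.extend(list(container.get(x, ()))[::-1])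
--     return to_add_status_to
-- ===== Notes on version B (the rewrite author's own statement) =====
-- stated objective: alternative
-- what changed: B replaces A's per-sensor recursive closure computation (which re-expands shared subtrees on every encounter) by an iterative explicit-stack DFS with a visited set per matching container entry, so each reachable node is expanded at most once.
import Mathlib
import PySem

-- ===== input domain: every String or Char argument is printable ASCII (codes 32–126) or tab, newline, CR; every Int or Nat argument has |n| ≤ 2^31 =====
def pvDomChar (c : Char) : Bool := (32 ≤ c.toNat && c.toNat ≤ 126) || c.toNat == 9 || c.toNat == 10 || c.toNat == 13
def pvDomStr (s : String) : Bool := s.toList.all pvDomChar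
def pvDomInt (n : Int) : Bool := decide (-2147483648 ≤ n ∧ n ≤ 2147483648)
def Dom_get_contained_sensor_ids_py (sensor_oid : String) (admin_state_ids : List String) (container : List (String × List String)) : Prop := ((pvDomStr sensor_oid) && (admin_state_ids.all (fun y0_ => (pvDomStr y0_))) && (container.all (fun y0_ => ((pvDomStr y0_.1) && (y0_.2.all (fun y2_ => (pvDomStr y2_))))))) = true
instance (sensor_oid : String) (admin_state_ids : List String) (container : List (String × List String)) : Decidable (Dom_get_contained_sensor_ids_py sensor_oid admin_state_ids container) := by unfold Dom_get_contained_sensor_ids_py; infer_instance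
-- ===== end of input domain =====

-- B replaces A's per-sensor recursive re-expansion of the containment graph by an iterative
-- explicit-stack DFS with a visited set per container entry (an alternative algorithm; the
-- equivalence of the two traversal orders is what the proof below establishes).


-- ===== PORT A =====
-- container.get(sensor_id, []) — dict-lookup helper shared by both ports (and by Pre_)
def pvKids (container : List (String × List String)) (x : String) : List String :=
  PySem.Dict.getD (PySem.Dict.ofList container) x []

-- _get_child_contained_sensor_ids, transliterated; `avail` (keys not yet descended into on the
-- current path) is only a termination guard: on the inputs Pre_ admits it never blocks a call.
mutual
def pvClosA (container : List (String × List String)) (avail : List String) (x : String) : List String :=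
  pvClosAK container avail (pvKids container x) (PySem.Set.add PySem.Set.empty x)
termination_by (avail.length, 1, 0)

def pvClosAK (container : List (String × List String)) (avail : List String) (kids : List String) (s : List String) : List String :=
  match kids with
  | [] => s
  | c :: rest =>
    let r := if h : c ∈ avail then pvClosA container (avail.erase c) c else [c]
    pvClosAK container avail rest (PySem.Set.add (PySem.Set.update s r) c)
termination_by (avail.length, 0, kids.length)
decreasing_by
  · simp_wf; rw [List.length_erase_of_mem h]; have := List.length_pos_of_mem h; omega
  · simp_wf; exact Prod.Lex.right _ (Prod.Lex.right _ (by omega))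
end

def get_contained_sensor_ids_py (sensor_oid : String) (admin_state_ids : List String) (container : List (String × List String)) : List String :=
  (PySem.Dict.ofList container).items.foldl
    (fun acc p =>
      if PySem.Set.contains p.2 sensor_oid then
        if 1 < PySem.Set.len (PySem.Set.inter p.2 admin_state_ids) then
          PySem.Set.update acc (pvClosA container (container.map Prod.fst) sensor_oid)
        else
          p.2.foldl (fun a s => PySem.Set.update a (pvClosA container (container.map Prod.fst) s))
            (PySem.Set.update acc (p.1.toList.map (fun ch => String.ofList [ch])))
      else acc)
    PySem.Set.empty

-- ===== PORT B =====
-- the universe of nodes the DFS can ever push (all sensors occurring inside container values)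
def pvU (container : List (String × List String)) : List String :=
  PySem.Set.ofList (container.flatMap (fun p => p.2))

-- fuel bookkeeping for the while-loop: total budget of the not-yet-visited nodes
def pvW (container : List (String × List String)) (seen : List String) : Nat :=
  (((pvU container).filter (fun y => decide (y ∉ seen))).map
    (fun x => 1 + (pvKids container x).length)).sum

-- Source B's `while stack:` loop; the Lean list is the Python stack reversed (head = next popped);
-- `stack.extend(list(...)[::-1])` followed by `pop()` is `pvKids container x ++ st`.
-- The fuel argument is only a termination device: pvRunDfs always supplies enough.
def pvDfs (container : List (String × List String)) :
    Nat → List String → List String → List String → List String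
  | 0, _, _, out => out
  | _ + 1, [], _, out => out
  | f + 1, x :: st, seen, out =>
    if x ∈ seen then pvDfs container f st seen out
    else pvDfs container f (pvKids container x ++ st) (x :: seen) (PySem.Set.add out x)

def pvRunDfs (container : List (String × List String)) (stack out : List String) : List String :=
  pvDfs container (stack.length + pvW container [] + 1) stack [] out

def get_contained_sensor_ids_py_alt (sensor_oid : String) (admin_state_ids : List String) (container : List (String × List String)) : List String :=
  (PySem.Dict.ofList container).items.foldl
    (fun acc p =>
      if PySem.Set.contains p.2 sensor_oid then
        if 1 < PySem.Set.len (PySem.Set.inter p.2 admin_state_ids) then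
          pvRunDfs container [sensor_oid] acc
        else
          pvRunDfs container p.2
            (PySem.Set.update acc (p.1.toList.map (fun ch => String.ofList [ch])))
      else acc)
    PySem.Set.empty

-- ===== PRECONDITION & SPEC =====
-- fueled reachability in the containment graph: pvReachB f x y = "y is reachable from x in 1..f steps"
def pvReachB (container : List (String × List String)) : Nat → String → String → Bool
  | 0, _, _ => false
  | (f+1), x, y => (pvKids container x).any (fun c => c == y || pvReachB container f c y)

-- "no key reachable from s (s included) lies on a cycle": the containment graph walked from s is acyclic
def pvGoodB (container : List (String × List String)) (s : String) : Bool :=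
  (container.map Prod.fst).all (fun k =>
    !((s == k || pvReachB container (container.length + 1) s k) && pvReachB container (container.length + 1) k k))

-- Pre_ excludes exactly the inputs on which A's unbounded containment recursion runs into a cycle
-- and raises RecursionError: every sensor whose contained-set A actually computes must sit in an
-- acyclic part of the containment graph.
def Pre_get_contained_sensor_ids_py (sensor_oid : String) (admin_state_ids : List String) (container : List (String × List String)) : Prop :=
  ∀ p ∈ (PySem.Dict.ofList container).items, sensor_oid ∈ p.2 →
    (if 1 < PySem.Set.len (PySem.Set.inter p.2 admin_state_ids)
     then pvGoodB container sensor_oid = true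
     else ∀ s ∈ p.2, pvGoodB container s = true)
instance (sensor_oid : String) (admin_state_ids : List String) (container : List (String × List String)) : Decidable (Pre_get_contained_sensor_ids_py sensor_oid admin_state_ids container) := by unfold Pre_get_contained_sensor_ids_py; infer_instance

def pvWitness_get_contained_sensor_ids_py : String × List String × (List (String × List String)) :=
  ("s1", ["s9"], [("c1", ["s1", "s2"]), ("s1", ["s3"])])

def Spec_get_contained_sensor_ids_py (sensor_oid : String) (admin_state_ids : List String) (container : List (String × List String)) (out : List String) : Prop := out = get_contained_sensor_ids_py_alt sensor_oid admin_state_ids container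
instance (sensor_oid : String) (admin_state_ids : List String) (container : List (String × List String)) (out : List String) : Decidable (Spec_get_contained_sensor_ids_py sensor_oid admin_state_ids container out) := by unfold Spec_get_contained_sensor_ids_py; infer_instance

-- ===== CLAIM (what is proved, stated in full; the proofs are below) =====
def Claim_equal_get_contained_sensor_ids_py : Prop := ∀ (sensor_oid : String) (admin_state_ids : List String) (container : List (String × List String)), Dom_get_contained_sensor_ids_py sensor_oid admin_state_ids container → Pre_get_contained_sensor_ids_py sensor_oid admin_state_ids container → Spec_get_contained_sensor_ids_py sensor_oid admin_state_ids container (get_contained_sensor_ids_py sensor_oid admin_state_ids container)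

-- ===== LEMMAS AND PROOFS =====

theorem pv_witness_ok :
    Dom_get_contained_sensor_ids_py pvWitness_get_contained_sensor_ids_py.1 pvWitness_get_contained_sensor_ids_py.2.1 pvWitness_get_contained_sensor_ids_py.2.2 ∧
    Pre_get_contained_sensor_ids_py pvWitness_get_contained_sensor_ids_py.1 pvWitness_get_contained_sensor_ids_py.2.1 pvWitness_get_contained_sensor_ids_py.2.2 := by
  constructor <;> decide

-- ---------- unfolding equations for the mutual well-founded definitions ----------
theorem pv_closAK_nil (container : List (String × List String)) (avail : List String) (s : List String) :
    pvClosAK container avail [] s = s := by rw [pvClosAK]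

theorem pv_closAK_cons (container : List (String × List String)) (avail : List String) (c : String)
    (rest : List String) (s : List String) :
    pvClosAK container avail (c :: rest) s =
      pvClosAK container avail rest
        (PySem.Set.add (PySem.Set.update s (if c ∈ avail then pvClosA container (avail.erase c) c else [c])) c) := by
  rw [pvClosAK]; simp only [dite_eq_ite]

theorem pv_closA_eq (container : List (String × List String)) (avail : List String) (x : String) :
    pvClosA container avail x = pvClosAK container avail (pvKids container x) (PySem.Set.add PySem.Set.empty x) := by
  rw [pvClosA]

-- ---------- the containment graph ----------
def pvEdge (container : List (String × List String)) (a b : String) : Prop := b ∈ pvKids container a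

theorem pv_kids_nil_of_not_key {container : List (String × List String)} {x : String}
    (h : x ∉ container.map Prod.fst) : pvKids container x = [] := by
  have hkeys : (PySem.Dict.ofList container).keys =
      PySem.Set.update (PySem.Dict.empty : PySem.Dict String (List String)).keys (container.map Prod.fst) :=
    PySem.Dict.keys_foldl_insert_key container Prod.fst (fun _ p => p.2) PySem.Dict.empty
  have hget : (PySem.Dict.ofList container).get? x = none := by
    rw [PySem.Dict.get?_eq_none_iff_not_mem_keys, hkeys, PySem.Dict.keys_empty]
    intro hx
    exact h (by simpa [PySem.Set.mem_update] using hx)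
  exact PySem.Dict.getD_of_get?_eq_none _ _ hget

theorem pv_key_of_edge {container : List (String × List String)} {a b : String}
    (h : pvEdge container a b) : a ∈ container.map Prod.fst := by
  by_contra hk
  rw [pvEdge, pv_kids_nil_of_not_key hk] at h
  exact absurd h (List.not_mem_nil)

-- x's reachable part of the graph is acyclic
def pvGoodS (container : List (String × List String)) (x : String) : Prop :=
  ∀ k, Relation.ReflTransGen (pvEdge container) x k → ¬ Relation.TransGen (pvEdge container) k k

-- avail still holds every key properly reachable from x
def pvClosedS (container : List (String × List String)) (avail : List String) (x : String) : Prop :=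
  ∀ k, Relation.TransGen (pvEdge container) x k → k ∈ container.map Prod.fst → k ∈ avail

theorem pvGoodS_child {container : List (String × List String)} {x c : String}
    (hg : pvGoodS container x) (he : pvEdge container x c) : pvGoodS container c :=
  fun k hk => hg k (Relation.ReflTransGen.head he hk)

theorem pvClosedS_all (container : List (String × List String)) (x : String) :
    pvClosedS container (container.map Prod.fst) x := fun _ _ hk => hk

theorem pvClosedS_child {container : List (String × List String)} {avail : List String} {x c : String}
    (hg : pvGoodS container x) (he : pvEdge container x c) (hc : pvClosedS container avail x) :
    pvClosedS container (avail.erase c) c := by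
  intro k hk hkey
  have hxk : Relation.TransGen (pvEdge container) x k := Relation.TransGen.head he hk
  have hne : k ≠ c := by
    rintro rfl
    exact hg k (Relation.ReflTransGen.single he) hk
  exact (List.mem_erase_of_ne hne).2 (hc k hxk hkey)

theorem pv_closA_nonkey {container : List (String × List String)} {c : String}
    (h : pvKids container c = []) (avail : List String) : pvClosA container avail c = [c] := by
  rw [pv_closA_eq, h, pv_closAK_nil]
  rfl

-- ---------- stability: pvClosA does not depend on the avail guard on good inputs ----------
theorem pv_stabK {container : List (String × List String)} :
    ∀ n (avail1 avail2 : List String) (x : String) (kids s : List String),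
      avail1.length < n → pvGoodS container x →
      pvClosedS container avail1 x → pvClosedS container avail2 x →
      (∀ c ∈ kids, pvEdge container x c) →
      pvClosAK container avail1 kids s = pvClosAK container avail2 kids s := by
  intro n
  induction n with
  | zero => intro avail1 _ _ _ _ h; omega
  | succ n ih =>
    intro avail1 avail2 x kids
    induction kids with
    | nil => intro s _ _ _ _ _; rw [pv_closAK_nil, pv_closAK_nil]
    | cons c rest ihk =>
      intro s hlen hg hc1 hc2 hkids
      have he : pvEdge container x c := hkids c (by simp)
      have hrest : ∀ c' ∈ rest, pvEdge container x c' := fun c' hc' => hkids c' (by simp [hc'])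
      rw [pv_closAK_cons, pv_closAK_cons]
      by_cases hkey : c ∈ container.map Prod.fst
      · have hm1 : c ∈ avail1 := hc1 c (Relation.TransGen.single he) hkey
        have hm2 : c ∈ avail2 := hc2 c (Relation.TransGen.single he) hkey
        rw [if_pos hm1, if_pos hm2]
        have hrec : pvClosA container (avail1.erase c) c = pvClosA container (avail2.erase c) c := by
          rw [pv_closA_eq, pv_closA_eq]
          refine ih (avail1.erase c) (avail2.erase c) c (pvKids container c) _ ?_
            (pvGoodS_child hg he) (pvClosedS_child hg he hc1) (pvClosedS_child hg he hc2)
            (fun d hd => hd)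
          have h1 := List.length_erase_of_mem hm1
          have h2 := List.length_pos_of_mem hm1
          omega
        rw [hrec]
        exact ihk _ hlen hg hc1 hc2 hrest
      · have hnil : pvKids container c = [] := pv_kids_nil_of_not_key hkey
        have hv1 : (if c ∈ avail1 then pvClosA container (avail1.erase c) c else [c]) = [c] := by
          split
          · exact pv_closA_nonkey hnil _
          · rfl
        have hv2 : (if c ∈ avail2 then pvClosA container (avail2.erase c) c else [c]) = [c] := by
          split
          · exact pv_closA_nonkey hnil _
          · rfl
        rw [hv1, hv2]
        exact ihk _ hlen hg hc1 hc2 hrest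

theorem pv_stab {container : List (String × List String)} {avail1 avail2 : List String} {x : String}
    (hg : pvGoodS container x) (h1 : pvClosedS container avail1 x) (h2 : pvClosedS container avail2 x) :
    pvClosA container avail1 x = pvClosA container avail2 x := by
  rw [pv_closA_eq, pv_closA_eq]
  exact pv_stabK (avail1.length + 1) avail1 avail2 x _ _ (by omega) hg h1 h2 (fun d hd => hd)

-- ---------- ordered-set (PySem.Set) facts specific to the two programs ----------
theorem pv_upd_noop {a l : List String} (h : ∀ e ∈ l, e ∈ a) : PySem.Set.update a l = a := by
  rw [PySem.Set.update_eq_append_filter]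
  have : (PySem.Set.ofList l).filter (fun y => !(PySem.Set.contains a y)) = [] := by
    rw [List.filter_eq_nil_iff]
    intro y hy
    rw [Bool.not_eq_true, Bool.not_eq_false']
    exact (PySem.Set.contains_iff a y).2 (h y ((PySem.Set.mem_ofList _ _).1 hy))
  rw [this, List.append_nil]

theorem pv_upd_add (a b : List String) (x : String) :
    PySem.Set.update a (PySem.Set.add b x) = PySem.Set.add (PySem.Set.update a b) x := by
  by_cases hx : x ∈ b
  · have h2 : x ∈ PySem.Set.update a b := (PySem.Set.mem_update _ _ _).2 (Or.inr hx)
    rw [PySem.Set.add_of_mem hx, PySem.Set.add_of_mem h2]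
  · rw [PySem.Set.add_of_not_mem hx, PySem.Set.update_append, PySem.Set.update_cons,
      PySem.Set.update_nil]

theorem pv_upd2 (a : List String) : ∀ (l b : List String),
    PySem.Set.update a (PySem.Set.update b l) = PySem.Set.update (PySem.Set.update a b) l := by
  intro l
  induction l with
  | nil => intro b; rw [PySem.Set.update_nil, PySem.Set.update_nil]
  | cons x l ih =>
    intro b
    rw [PySem.Set.update_cons, PySem.Set.update_cons, ih, pv_upd_add]

theorem pv_upd_singleton (a : List String) (x : String) :
    PySem.Set.update a [x] = PySem.Set.add a x := by
  rw [PySem.Set.update_cons, PySem.Set.update_nil]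

theorem pv_add_empty (x : String) : PySem.Set.add PySem.Set.empty x = [x] :=
  PySem.Set.add_of_not_mem (List.not_mem_nil)

-- ---------- membership structure of pvClosA ----------
theorem pv_closAK_supset {container : List (String × List String)} {avail : List String} :
    ∀ (kids s : List String) (e : String), e ∈ s → e ∈ pvClosAK container avail kids s := by
  intro kids
  induction kids with
  | nil => intro s e he; rw [pv_closAK_nil]; exact he
  | cons c rest ih =>
    intro s e he
    rw [pv_closAK_cons]
    exact ih _ e ((PySem.Set.mem_add _ _ _).2 (Or.inl ((PySem.Set.mem_update _ _ _).2 (Or.inl he))))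

theorem pv_mem_closA_self {container : List (String × List String)} (avail : List String) (x : String) :
    x ∈ pvClosA container avail x := by
  rw [pv_closA_eq, pv_add_empty]
  exact pv_closAK_supset _ _ x (by simp)

theorem pv_contrib {container : List (String × List String)} {avail : List String} :
    ∀ (kids s : List String) (c : String), c ∈ kids →
      c ∈ pvClosAK container avail kids s ∧
      (c ∈ avail → ∀ e ∈ pvClosA container (avail.erase c) c, e ∈ pvClosAK container avail kids s) := by
  intro kids
  induction kids with
  | nil => intro s c hc; exact absurd hc (List.not_mem_nil)
  | cons a rest ih =>
    intro s c hc
    rw [pv_closAK_cons]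
    rcases List.mem_cons.1 hc with rfl | hc'
    · constructor
      · exact pv_closAK_supset _ _ c ((PySem.Set.mem_add _ _ _).2 (Or.inr rfl))
      · intro hca e he
        refine pv_closAK_supset _ _ e
          ((PySem.Set.mem_add _ _ _).2 (Or.inl ((PySem.Set.mem_update _ _ _).2 (Or.inr ?_))))
        rw [if_pos hca]
        exact he
    · exact ih _ c hc'

theorem pv_RTG_no_kids {container : List (String × List String)} {c e : String}
    (h : pvKids container c = []) (hr : Relation.ReflTransGen (pvEdge container) c e) : e = c := by
  rcases Relation.ReflTransGen.cases_head hr with rfl | ⟨k, hk, _⟩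
  · rfl
  · rw [pvEdge, h] at hk
    exact absurd hk (List.not_mem_nil)

theorem pv_char_fwd {container : List (String × List String)} :
    ∀ n (avail : List String) (x : String) (kids s : List String),
      avail.length < n → pvGoodS container x → pvClosedS container avail x →
      (∀ c ∈ kids, pvEdge container x c) →
      ∀ e ∈ pvClosAK container avail kids s,
        e ∈ s ∨ ∃ c ∈ kids, Relation.ReflTransGen (pvEdge container) c e := by
  intro n
  induction n with
  | zero => intro avail _ _ _ h; omega
  | succ n ih =>
    intro avail x kids
    induction kids with
    | nil => intro s _ _ _ _ e he; rw [pv_closAK_nil] at he; exact Or.inl he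
    | cons c rest ihk =>
      intro s hlen hg hcl hkids e he
      have hec : pvEdge container x c := hkids c (by simp)
      rw [pv_closAK_cons] at he
      rcases ihk _ hlen hg hcl (fun c' hc' => hkids c' (by simp [hc'])) e he with hs | ⟨c', hc', hr⟩
      · rcases (PySem.Set.mem_add _ _ _).1 hs with hs' | rfl
        · rcases (PySem.Set.mem_update _ _ _).1 hs' with hss | hr
          · exact Or.inl hss
          · by_cases hca : c ∈ avail
            · rw [if_pos hca, pv_closA_eq, pv_add_empty] at hr
              have hgc := pvGoodS_child hg hec
              have hcc := pvClosedS_child hg hec hcl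
              have hlen' : (avail.erase c).length < n := by
                have h1 := List.length_erase_of_mem hca
                have h2 := List.length_pos_of_mem hca
                omega
              rcases ih (avail.erase c) c (pvKids container c) _ hlen' hgc hcc (fun d hd => hd) e hr with
                h1 | ⟨k, hk, hke⟩
              · rcases List.mem_singleton.1 h1 with rfl
                exact Or.inr ⟨e, by simp, Relation.ReflTransGen.refl⟩
              · exact Or.inr ⟨c, by simp, Relation.ReflTransGen.head hk hke⟩
            · rw [if_neg hca] at hr
              rcases List.mem_singleton.1 hr with rfl
              exact Or.inr ⟨e, by simp, Relation.ReflTransGen.refl⟩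
        · exact Or.inr ⟨e, by simp, Relation.ReflTransGen.refl⟩
      · exact Or.inr ⟨c', by simp [hc'], hr⟩

theorem pv_mem_closA_RTG {container : List (String × List String)} {avail : List String} {x e : String}
    (hg : pvGoodS container x) (hcl : pvClosedS container avail x)
    (he : e ∈ pvClosA container avail x) : Relation.ReflTransGen (pvEdge container) x e := by
  rw [pv_closA_eq, pv_add_empty] at he
  rcases pv_char_fwd (avail.length + 1) avail x (pvKids container x) _ (by omega) hg hcl
      (fun d hd => hd) e he with h1 | ⟨c, hc, hr⟩
  · rcases List.mem_singleton.1 h1 with rfl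
    exact Relation.ReflTransGen.refl
  · exact Relation.ReflTransGen.head hc hr

theorem pv_RTG_mem_closA {container : List (String × List String)} :
    ∀ n (avail : List String) (x e : String), avail.length < n →
      pvGoodS container x → pvClosedS container avail x →
      Relation.ReflTransGen (pvEdge container) x e → e ∈ pvClosA container avail x := by
  intro n
  induction n with
  | zero => intro avail _ _ h; omega
  | succ n ih =>
    intro avail x e hlen hg hcl hr
    rcases Relation.ReflTransGen.cases_head hr with rfl | ⟨c, he, hce⟩
    · exact pv_mem_closA_self avail x
    · by_cases hkey : c ∈ container.map Prod.fst
      · have hca : c ∈ avail := hcl c (Relation.TransGen.single he) hkey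
        have hlen' : (avail.erase c).length < n := by
          have h1 := List.length_erase_of_mem hca
          have h2 := List.length_pos_of_mem hca
          omega
        have hec : e ∈ pvClosA container (avail.erase c) c :=
          ih (avail.erase c) c e hlen' (pvGoodS_child hg he) (pvClosedS_child hg he hcl) hce
        rw [pv_closA_eq]
        exact (pv_contrib (pvKids container x) _ c he).2 hca e hec
      · have hnil := pv_kids_nil_of_not_key hkey
        have : e = c := pv_RTG_no_kids hnil hce
        subst this
        rw [pv_closA_eq]
        exact (pv_contrib (pvKids container x) _ e he).1

theorem pv_closF_char {container : List (String × List String)} {c : String}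
    (hg : pvGoodS container c) (y : String) :
    y ∈ pvClosA container (container.map Prod.fst) c ↔
      y = c ∨ ∃ k ∈ pvKids container c, y ∈ pvClosA container (container.map Prod.fst) k := by
  constructor
  · intro hy
    have hr := pv_mem_closA_RTG hg (pvClosedS_all container c) hy
    rcases Relation.ReflTransGen.cases_head hr with rfl | ⟨k, hk, hky⟩
    · exact Or.inl rfl
    · exact Or.inr ⟨k, hk, pv_RTG_mem_closA ((container.map Prod.fst).length + 1) _ k y (by omega)
        (pvGoodS_child hg hk) (pvClosedS_all container k) hky⟩
  · intro hy
    rcases hy with rfl | ⟨k, hk, hyk⟩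
    · exact pv_mem_closA_self _ y
    · have hky := pv_mem_closA_RTG (pvGoodS_child hg hk) (pvClosedS_all container k) hyk
      exact pv_RTG_mem_closA ((container.map Prod.fst).length + 1) _ c y (by omega) hg
        (pvClosedS_all container c) (Relation.ReflTransGen.head hk hky)

-- ---------- update-against-out form of pvClosA (A's per-sensor fold) ----------
theorem pv_closfold {container : List (String × List String)} :
    ∀ (kids : List String) {avail : List String} {x : String} (s out : List String),
      pvGoodS container x → pvClosedS container avail x → (∀ c ∈ kids, pvEdge container x c) →
      PySem.Set.update out (pvClosAK container avail kids s) =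
        kids.foldl (fun a c => PySem.Set.update a (pvClosA container (container.map Prod.fst) c))
          (PySem.Set.update out s) := by
  intro kids
  induction kids with
  | nil => intro avail x s out _ _ _; rw [pv_closAK_nil, List.foldl_nil]
  | cons c rest ih =>
    intro avail x s out hg hcl hkids
    have hec : pvEdge container x c := hkids c (by simp)
    rw [pv_closAK_cons, List.foldl_cons]
    rw [ih _ _ hg hcl (fun c' hc' => hkids c' (by simp [hc']))]
    congr 1
    by_cases hca : c ∈ avail
    · rw [if_pos hca]
      have hstab : pvClosA container (avail.erase c) c = pvClosA container (container.map Prod.fst) c :=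
        pv_stab (pvGoodS_child hg hec) (pvClosedS_child hg hec hcl) (pvClosedS_all container c)
      have hmem : c ∈ PySem.Set.update s (pvClosA container (avail.erase c) c) :=
        (PySem.Set.mem_update _ _ _).2 (Or.inr (pv_mem_closA_self _ c))
      rw [PySem.Set.add_of_mem hmem, pv_upd2, hstab]
    · rw [if_neg hca]
      have hkey : c ∉ container.map Prod.fst := by
        intro hk
        exact hca (hcl c (Relation.TransGen.single hec) hk)
      rw [pv_closA_nonkey (pv_kids_nil_of_not_key hkey), pv_upd_singleton]
      have hmem : c ∈ PySem.Set.add s c := (PySem.Set.mem_add _ _ _).2 (Or.inr rfl)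
      rw [PySem.Set.add_of_mem hmem, ← pv_upd_singleton s c, pv_upd2, pv_upd_singleton]

theorem pv_visit_eq {container : List (String × List String)} {x : String}
    (hg : pvGoodS container x) (out : List String) :
    PySem.Set.update out (pvClosA container (container.map Prod.fst) x) =
      (pvKids container x).foldl
        (fun a c => PySem.Set.update a (pvClosA container (container.map Prod.fst) c))
        (PySem.Set.add out x) := by
  rw [pv_closA_eq, pv_add_empty,
    pv_closfold (pvKids container x) [x] out hg (pvClosedS_all container x) (fun d hd => hd),
    pv_upd_singleton]

-- ---------- the fuel budget pvW ----------
theorem pv_sum_filter_le (f : String → Nat) (p q : String → Bool)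
    (h : ∀ y, q y = true → p y = true) :
    ∀ l : List String, ((l.filter q).map f).sum ≤ ((l.filter p).map f).sum := by
  intro l
  induction l with
  | nil => simp
  | cons a l ih =>
    by_cases hq : q a = true
    · rw [List.filter_cons_of_pos hq, List.filter_cons_of_pos (h a hq)]
      simp only [List.map_cons, List.sum_cons]
      omega
    · rw [List.filter_cons_of_neg (by simpa using hq)]
      by_cases hp : p a = true
      · rw [List.filter_cons_of_pos hp]
        simp only [List.map_cons, List.sum_cons]
        omega
      · rw [List.filter_cons_of_neg (by simpa using hp)]
        exact ih

theorem pvW_mono {container : List (String × List String)} {seen seen' : List String}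
    (h : ∀ y ∈ seen, y ∈ seen') : pvW container seen' ≤ pvW container seen := by
  unfold pvW
  refine pv_sum_filter_le _ _ _ ?_ _
  intro y hy
  simp only [decide_eq_true_eq] at hy ⊢
  intro hc
  exact hy (h y hc)

theorem pv_sum_split (f : String → Nat) :
    ∀ (l : List String) (seen : List String) (x : String), l.Nodup → x ∈ l → x ∉ seen →
      ((l.filter (fun y => decide (y ∉ seen))).map f).sum =
        f x + ((l.filter (fun y => decide (y ∉ x :: seen))).map f).sum := by
  intro l
  induction l with
  | nil => intro seen x _ hx; exact absurd hx (List.not_mem_nil)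
  | cons a l ih =>
    intro seen x hnd hx hxs
    rcases List.mem_cons.1 hx with rfl | hx'
    · have hal : x ∉ l := (List.nodup_cons.1 hnd).1
      rw [List.filter_cons_of_pos (by simpa using hxs),
        List.filter_cons_of_neg (by simp)]
      have : l.filter (fun y => decide (y ∉ seen)) = l.filter (fun y => decide (y ∉ x :: seen)) := by
        refine List.filter_congr ?_
        intro y hy
        have hyx : y ≠ x := fun h => hal (h ▸ hy)
        simp [hyx]
      rw [List.map_cons, List.sum_cons, this]
    · have hax : a ≠ x := by
        rintro rfl
        exact (List.nodup_cons.1 hnd).1 hx'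
      by_cases ha : a ∈ seen
      · rw [List.filter_cons_of_neg (by simpa using ha),
          List.filter_cons_of_neg (by simp [ha])]
        exact ih seen x (List.nodup_cons.1 hnd).2 hx' hxs
      · rw [List.filter_cons_of_pos (by simpa using ha),
          List.filter_cons_of_pos (by simp [ha, hax])]
        simp only [List.map_cons, List.sum_cons]
        rw [ih seen x (List.nodup_cons.1 hnd).2 hx' hxs]
        omega

theorem pvW_visit {container : List (String × List String)} {seen : List String} {x : String}
    (hU : x ∈ pvU container) (hxs : x ∉ seen) :
    pvW container seen = 1 + (pvKids container x).length + pvW container (x :: seen) := by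
  unfold pvW
  rw [pv_sum_split (fun y => 1 + (pvKids container y).length) (pvU container) seen x
    (by unfold pvU; exact PySem.Set.nodup_ofList _) hU hxs]

-- ---------- universe membership ----------
theorem pv_items_sub : ∀ (c : List (String × List String)) (q : String × List String),
    q ∈ (PySem.Dict.ofList c).items → q ∈ c := by
  have aux : ∀ (l : List (String × List String)) (d : PySem.Dict String (List String))
      (q : String × List String),
      q ∈ (l.foldl (fun d p => d.insert p.1 p.2) d).items → q ∈ l ∨ q ∈ d.items := by
    intro l
    induction l with
    | nil => intro d q hq; exact Or.inr hq
    | cons p l ih =>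
      intro d q hq
      rcases ih _ q hq with h | h
      · exact Or.inl (by simp [h])
      · rcases (PySem.Dict.mem_items_insert d p.1 p.2 q).1 h with h' | ⟨h', _⟩
        · exact Or.inl (by simp [h'])
        · exact Or.inr h'
  intro c q hq
  rcases aux c PySem.Dict.empty q hq with h | h
  · exact h
  · simp [PySem.Dict.empty] at h

theorem pv_kids_sub_U {container : List (String × List String)} {x e : String}
    (h : e ∈ pvKids container x) : e ∈ pvU container := by
  unfold pvKids at h
  cases hget : (PySem.Dict.ofList container).get? x with
  | none => rw [PySem.Dict.getD_of_get?_eq_none _ _ hget] at h; exact absurd h (List.not_mem_nil)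
  | some v =>
    rw [PySem.Dict.getD_of_get?_eq_some _ _ hget] at h
    have hmem := pv_items_sub container (x, v) (PySem.Dict.mem_items_of_get?_eq_some _ hget)
    exact (PySem.Set.mem_ofList _ _).2 (List.mem_flatMap.2 ⟨(x, v), hmem, h⟩)

theorem pv_val_sub_U {container : List (String × List String)} {p : String × List String}
    (hp : p ∈ (PySem.Dict.ofList container).items) {s : String} (hs : s ∈ p.2) :
    s ∈ pvU container :=
  (PySem.Set.mem_ofList _ _).2 (List.mem_flatMap.2 ⟨p, pv_items_sub container p hp, hs⟩)

-- ---------- the DFS loop ----------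
theorem pv_dfs_nil {container : List (String × List String)} (f : Nat) (seen out : List String) :
    pvDfs container f [] seen out = out := by
  cases f <;> rfl

theorem pv_fi {container : List (String × List String)} :
    ∀ n (stack seen : List String), stack.length + pvW container seen < n →
      (∀ c ∈ stack, c ∈ pvU container) → ∀ (out : List String) (f₁ f₂ : Nat),
      stack.length + pvW container seen ≤ f₁ → stack.length + pvW container seen ≤ f₂ →
      pvDfs container f₁ stack seen out = pvDfs container f₂ stack seen out := by
  intro n
  induction n with
  | zero => intro stack seen h; omega
  | succ n ih =>
    intro stack seen hn hU out f₁ f₂ h₁ h₂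
    cases stack with
    | nil => rw [pv_dfs_nil, pv_dfs_nil]
    | cons x st =>
      obtain ⟨g₁, rfl⟩ : ∃ g, f₁ = g + 1 := ⟨f₁ - 1, by simp at h₁; omega⟩
      obtain ⟨g₂, rfl⟩ : ∃ g, f₂ = g + 1 := ⟨f₂ - 1, by simp at h₂; omega⟩
      simp only [pvDfs]
      by_cases hx : x ∈ seen
      · rw [if_pos hx, if_pos hx]
        refine ih st seen (by simp at hn; omega) (fun c hc => hU c (by simp [hc])) out g₁ g₂ ?_ ?_ <;>
          · simp at h₁ h₂ ⊢; omega
      · rw [if_neg hx, if_neg hx]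
        have hW := pvW_visit (hU x (by simp)) hx
        refine ih (pvKids container x ++ st) (x :: seen) ?_ ?_ (PySem.Set.add out x) g₁ g₂ ?_ ?_
        · simp at hn ⊢; omega
        · intro c hc
          rcases List.mem_append.1 hc with h | h
          · exact pv_kids_sub_U h
          · exact hU c (by simp [h])
        · simp at h₁ ⊢; omega
        · simp at h₂ ⊢; omega

-- the invariant: every visited node is either gray (on the current DFS path, in G) or black
-- (its whole closure already emitted and visited)
def pvInvD (container : List (String × List String)) (G seen out : List String) : Prop :=
  ∀ y ∈ seen, y ∈ G ∨
    ((∀ e ∈ pvClosA container (container.map Prod.fst) y, e ∈ out) ∧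
     (∀ e ∈ pvClosA container (container.map Prod.fst) y, e ∈ seen))

theorem pv_kmain {container : List (String × List String)} :
    ∀ n (ks : List String), ∀ (seen : List String), pvW container seen < n →
      ∀ (st out G : List String),
      (∀ c ∈ ks, c ∈ pvU container) →
      (∀ c ∈ st, c ∈ pvU container) →
      (∀ c ∈ ks, pvGoodS container c) →
      (∀ g ∈ G, pvGoodS container g ∧ ∀ c ∈ ks, Relation.TransGen (pvEdge container) g c) →
      (∀ g ∈ G, g ∈ seen) →
      pvInvD container G seen out →
      ∃ seen',
        (∀ y, y ∈ seen' ↔ y ∈ seen ∨ ∃ c ∈ ks, y ∈ pvClosA container (container.map Prod.fst) c) ∧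
        pvInvD container G seen'
          (ks.foldl (fun a c => PySem.Set.update a (pvClosA container (container.map Prod.fst) c)) out) ∧
        ∀ f, (ks ++ st).length + pvW container seen ≤ f →
          pvDfs container f (ks ++ st) seen out =
            pvDfs container f st seen'
              (ks.foldl (fun a c => PySem.Set.update a (pvClosA container (container.map Prod.fst) c)) out) := by
  intro n
  induction n using Nat.strong_induction_on with
  | _ n ihn =>
    intro ks
    induction ks with
    | nil =>
      intro seen hn st out G _ _ _ _ _ hinv
      exact ⟨seen, by simp, by simpa using hinv, fun f _ => by simp⟩
    | cons c rest ihk =>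
      intro seen hn st out G hUks hUst hgks hG hGseen hinv
      have hgc : pvGoodS container c := hgks c (by simp)
      by_cases hcs : c ∈ seen
      · -- c already visited: it must be black (a gray re-encounter would be a cycle)
        have hblack : (∀ e ∈ pvClosA container (container.map Prod.fst) c, e ∈ out) ∧
            (∀ e ∈ pvClosA container (container.map Prod.fst) c, e ∈ seen) := by
          rcases hinv c hcs with hgray | hb
          · exfalso
            exact hgc c Relation.ReflTransGen.refl ((hG c hgray).2 c (by simp))
          · exact hb
        have hupd : PySem.Set.update out (pvClosA container (container.map Prod.fst) c) = out :=
          pv_upd_noop hblack.1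
        obtain ⟨seen', hchar, hinv', heq⟩ :=
          ihk seen hn st out G (fun c' hc' => hUks c' (by simp [hc'])) hUst
            (fun c' hc' => hgks c' (by simp [hc']))
            (fun g hg => ⟨(hG g hg).1, fun c' hc' => (hG g hg).2 c' (by simp [hc'])⟩) hGseen hinv
        refine ⟨seen', ?_, ?_, ?_⟩
        · intro y
          rw [hchar y]
          constructor
          · rintro (hy | ⟨c', hc', hyc'⟩)
            · exact Or.inl hy
            · exact Or.inr ⟨c', by simp [hc'], hyc'⟩
          · rintro (hy | ⟨c', hc', hyc'⟩)
            · exact Or.inl hy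
            · rcases List.mem_cons.1 hc' with rfl | hc''
              · exact Or.inl (hblack.2 y hyc')
              · exact Or.inr ⟨c', hc'', hyc'⟩
        · rw [List.foldl_cons, hupd]; exact hinv'
        · intro f hf
          obtain ⟨g, rfl⟩ : ∃ g, f = g + 1 := ⟨f - 1, by simp at hf; omega⟩
          have hstep : pvDfs container (g + 1) ((c :: rest) ++ st) seen out =
              pvDfs container g (rest ++ st) seen out := by
            simp only [List.cons_append, pvDfs, if_pos hcs]
          rw [hstep, heq g (by simp at hf ⊢; omega), List.foldl_cons, hupd]
          have hsub : ∀ y ∈ seen, y ∈ seen' := fun y hy => (hchar y).2 (Or.inl hy)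
          refine pv_fi (st.length + pvW container seen' + 1) st seen' (by omega) hUst _ g (g + 1) ?_ ?_ <;>
            · have := pvW_mono (container := container) hsub
              simp at hf ⊢; omega
      · -- visit c
        have hcU : c ∈ pvU container := hUks c (by simp)
        have hW := pvW_visit hcU hcs
        -- phase 1: run the DFS through c's children
        obtain ⟨seen₂, hchar₂, hinv₂, heq₂⟩ :=
          ihn (pvW container (c :: seen) + 1) (by omega) (pvKids container c) (c :: seen)
            (by omega) (rest ++ st) (PySem.Set.add out c) (c :: G)
            (fun k hk => pv_kids_sub_U hk)
            (fun z hz => by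
              rcases List.mem_append.1 hz with h | h
              · exact hUks z (by simp [h])
              · exact hUst z h)
            (fun k hk => pvGoodS_child hgc hk)
            (fun g hg => by
              rcases List.mem_cons.1 hg with rfl | hg'
              · exact ⟨hgc, fun k hk => Relation.TransGen.single hk⟩
              · exact ⟨(hG g hg').1, fun k hk => Relation.TransGen.tail ((hG g hg').2 c (by simp)) hk⟩)
            (fun g hg => by
              rcases List.mem_cons.1 hg with rfl | hg'
              · simp
              · simp [hGseen g hg'])
            (by
              intro y hy
              rcases List.mem_cons.1 hy with rfl | hy'
              · exact Or.inl (by simp)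
              · rcases hinv y hy' with hgray | hb
                · exact Or.inl (by simp [hgray])
                · exact Or.inr ⟨fun e he => (PySem.Set.mem_add _ _ _).2 (Or.inl (hb.1 e he)),
                    fun e he => by simp [hb.2 e he]⟩)
        have hfold₂ : (pvKids container c).foldl
            (fun a k => PySem.Set.update a (pvClosA container (container.map Prod.fst) k))
            (PySem.Set.add out c) =
            PySem.Set.update out (pvClosA container (container.map Prod.fst) c) :=
          (pv_visit_eq hgc out).symm
        have hchar₂' : ∀ y, y ∈ seen₂ ↔ y ∈ seen ∨ y ∈ pvClosA container (container.map Prod.fst) c := by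
          intro y
          rw [hchar₂ y]
          constructor
          · rintro (hy | ⟨k, hk, hyk⟩)
            · rcases List.mem_cons.1 hy with rfl | hy'
              · exact Or.inr (pv_mem_closA_self _ y)
              · exact Or.inl hy'
            · exact Or.inr ((pv_closF_char hgc y).2 (Or.inr ⟨k, hk, hyk⟩))
          · rintro (hy | hy)
            · exact Or.inl (by simp [hy])
            · rcases (pv_closF_char hgc y).1 hy with rfl | hk
              · exact Or.inl (by simp)
              · exact Or.inr hk
        have hsub₂ : ∀ y ∈ c :: seen, y ∈ seen₂ := fun y hy => (hchar₂ y).2 (Or.inl hy)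
        have hinv₂' : pvInvD container G seen₂
            (PySem.Set.update out (pvClosA container (container.map Prod.fst) c)) := by
          intro y hy
          rcases hinv₂ y hy with hgray | hb
          · rcases List.mem_cons.1 hgray with rfl | hg'
            · exact Or.inr ⟨fun e he => (PySem.Set.mem_update _ _ _).2 (Or.inr he),
                fun e he => (hchar₂' e).2 (Or.inr he)⟩
            · exact Or.inl hg'
          · rw [hfold₂] at hb
            exact Or.inr hb
        -- phase 2: continue with the remaining seeds
        have hWle₂ : pvW container seen₂ ≤ pvW container (c :: seen) := pvW_mono hsub₂
        obtain ⟨seen₃, hchar₃, hinv₃, heq₃⟩ :=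
          ihn (pvW container seen₂ + 1) (by omega) rest seen₂ (by omega) st
            (PySem.Set.update out (pvClosA container (container.map Prod.fst) c)) G
            (fun c' hc' => hUks c' (by simp [hc'])) hUst
            (fun c' hc' => hgks c' (by simp [hc']))
            (fun g hg => ⟨(hG g hg).1, fun c' hc' => (hG g hg).2 c' (by simp [hc'])⟩)
            (fun g hg => (hchar₂' g).2 (Or.inl (hGseen g hg))) hinv₂'
        refine ⟨seen₃, ?_, ?_, ?_⟩
        · intro y
          rw [hchar₃ y, hchar₂' y]
          constructor
          · rintro ((hy | hy) | ⟨c', hc', hyc'⟩)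
            · exact Or.inl hy
            · exact Or.inr ⟨c, by simp, hy⟩
            · exact Or.inr ⟨c', by simp [hc'], hyc'⟩
          · rintro (hy | ⟨c', hc', hyc'⟩)
            · exact Or.inl (Or.inl hy)
            · rcases List.mem_cons.1 hc' with rfl | hc''
              · exact Or.inl (Or.inr hyc')
              · exact Or.inr ⟨c', hc'', hyc'⟩
        · rw [List.foldl_cons]; exact hinv₃
        · intro f hf
          obtain ⟨g, rfl⟩ : ∃ g, f = g + 1 := ⟨f - 1, by simp at hf; omega⟩
          have hstep : pvDfs container (g + 1) ((c :: rest) ++ st) seen out =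
              pvDfs container g (pvKids container c ++ (rest ++ st)) (c :: seen)
                (PySem.Set.add out c) := by
            simp only [List.cons_append, pvDfs, if_neg hcs]
          rw [hstep, heq₂ g (by simp at hf ⊢; omega), hfold₂,
            heq₃ g (by simp at hf ⊢; omega), List.foldl_cons]
          have hsub₃ : ∀ y ∈ seen₂, y ∈ seen₃ := fun y hy => (hchar₃ y).2 (Or.inl hy)
          refine pv_fi (st.length + pvW container seen₃ + 1) st seen₃ (by omega) hUst _ g (g + 1) ?_ ?_ <;>
            · have h1 := pvW_mono (container := container) hsub₃
              simp at hf ⊢; omega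

theorem pv_entry {container : List (String × List String)} (seeds out : List String)
    (hU : ∀ s ∈ seeds, s ∈ pvU container) (hg : ∀ s ∈ seeds, pvGoodS container s) :
    pvRunDfs container seeds out =
      seeds.foldl (fun a s => PySem.Set.update a (pvClosA container (container.map Prod.fst) s)) out := by
  obtain ⟨seen', _, _, heq⟩ :=
    pv_kmain (pvW container [] + 1) seeds [] (by omega) [] out []
      hU (by simp) hg (by simp) (by simp) (by intro y hy; exact absurd hy (List.not_mem_nil))
  unfold pvRunDfs
  rw [show seeds ++ ([] : List String) = seeds from by simp] at heq
  rw [heq (seeds.length + pvW container [] + 1) (by simp), pv_dfs_nil]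

-- ---------- walks: from the fueled precondition to the semantic acyclicity ----------
inductive pvWL (container : List (String × List String)) : String → List String → String → Prop
  | nil (a : String) : pvWL container a [] a
  | cons {a b c : String} {p : List String} :
      pvEdge container a b → pvWL container b p c → pvWL container a (b :: p) c

theorem pvWL_nil_eq {container : List (String × List String)} {a b : String}
    (h : pvWL container a [] b) : a = b := by cases h; rfl

theorem pvWL_glue {container : List (String × List String)} {a b c : String} {p q : List String}
    (h1 : pvWL container a p b) (h2 : pvWL container b q c) : pvWL container a (p ++ q) c := by
  induction h1 with
  | nil => simpa using h2
  | cons e _ ih => exact pvWL.cons e (ih h2)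

theorem pvWL_split {container : List (String × List String)} {x b : String} {p2 : List String} :
    ∀ (p1 : List String) (a : String), pvWL container a (p1 ++ x :: p2) b →
      pvWL container a (p1 ++ [x]) x ∧ pvWL container x p2 b := by
  intro p1
  induction p1 with
  | nil =>
    intro a h
    cases h with
    | cons e w => exact ⟨pvWL.cons e (pvWL.nil x), w⟩
  | cons y p1' ih =>
    intro a h
    cases h with
    | cons e w =>
      obtain ⟨w1, w2⟩ := ih y w
      exact ⟨pvWL.cons e w1, w2⟩

theorem pvWL_of_transGen {container : List (String × List String)} {a b : String}
    (h : Relation.TransGen (pvEdge container) a b) : ∃ p, p ≠ [] ∧ pvWL container a p b := by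
  induction h with
  | @single b e => exact ⟨[b], by simp, pvWL.cons e (pvWL.nil b)⟩
  | @tail b c _ e ih =>
    obtain ⟨p, _, w⟩ := ih
    exact ⟨p ++ [c], by simp, pvWL_glue w (pvWL.cons e (pvWL.nil c))⟩

theorem pvWL_of_reflTransGen {container : List (String × List String)} {a b : String}
    (h : Relation.ReflTransGen (pvEdge container) a b) : ∃ p, pvWL container a p b := by
  induction h with
  | refl => exact ⟨[], pvWL.nil a⟩
  | @tail b c _ e ih =>
    obtain ⟨p, w⟩ := ih
    exact ⟨p ++ [c], pvWL_glue w (pvWL.cons e (pvWL.nil c))⟩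

theorem pvWL_sources {container : List (String × List String)} {a b : String} {p : List String}
    (h : pvWL container a p b) : ∀ y ∈ (a :: p).dropLast, y ∈ container.map Prod.fst := by
  induction h with
  | nil => simp
  | @cons a' b' c' p' e _ ih =>
    intro y hy
    rw [List.dropLast_cons₂] at hy
    rcases List.mem_cons.1 hy with rfl | hy'
    · exact pv_key_of_edge e
    · exact ih y hy'

theorem pv_dup_split {l : List String} (h : ¬ l.Nodup) :
    ∃ x l1 l2 l3, l = l1 ++ x :: l2 ++ x :: l3 := by
  induction l with
  | nil => simp at h
  | cons a l ih =>
    by_cases ha : a ∈ l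
    · obtain ⟨s, t, rfl⟩ := List.append_of_mem ha
      exact ⟨a, [], s, t, by simp⟩
    · have hl : ¬ l.Nodup := by
        intro hn
        exact h (List.nodup_cons.2 ⟨ha, hn⟩)
      obtain ⟨x, l1, l2, l3, rfl⟩ := ih hl
      exact ⟨x, a :: l1, l2, l3, by simp⟩

theorem pv_shorten {container : List (String × List String)} :
    ∀ n (p : List String) (a b : String), p.length ≤ n → pvWL container a p b →
      ∃ q, pvWL container a q b ∧ q.length ≤ p.length ∧ ((a :: q).dropLast).Nodup := by
  intro n
  induction n with
  | zero =>
    intro p a b hl hw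
    have : p = [] := List.length_eq_zero_iff.1 (by omega)
    subst this
    exact ⟨[], hw, le_rfl, by simp⟩
  | succ n ih =>
    intro p a b hl hw
    by_cases hnd : ((a :: p).dropLast).Nodup
    · exact ⟨p, hw, le_rfl, hnd⟩
    · obtain ⟨x, l1, l2, l3, hsplit⟩ := pv_dup_split hnd
      have hne : (a :: p) ≠ [] := by simp
      have hfull : (a :: p).dropLast ++ [(a :: p).getLast hne] = a :: p :=
        List.dropLast_append_getLast hne
      generalize hz : (a :: p).getLast hne = z at hfull
      rw [hsplit] at hfull
      cases l1 with
      | nil =>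
        simp only [List.nil_append, List.cons_append, List.append_assoc] at hfull
        injection hfull with hax hp0
        subst hax
        rw [← hp0] at hw
        obtain ⟨_, w2⟩ := pvWL_split l2 x hw
        have hplen := congrArg List.length hp0
        simp only [List.length_append, List.length_cons] at hplen
        have hlen2 : (l3 ++ [z]).length ≤ n := by simp; omega
        obtain ⟨q, hq, hql, hqnd⟩ := ih _ x b hlen2 w2
        refine ⟨q, hq, ?_, hqnd⟩
        simp at hql
        omega
      | cons a0 l1' =>
        simp only [List.cons_append, List.append_assoc] at hfull
        injection hfull with ha0 hp0
        subst ha0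
        rw [← hp0] at hw
        obtain ⟨w1, wrest⟩ := pvWL_split l1' a0 hw
        obtain ⟨_, w2⟩ := pvWL_split l2 x wrest
        have wglue := pvWL_glue w1 w2
        have hplen := congrArg List.length hp0
        simp only [List.length_append, List.length_cons] at hplen
        have hlen2 : ((l1' ++ [x]) ++ (l3 ++ [z])).length ≤ n := by simp; omega
        obtain ⟨q, hq, hql, hqnd⟩ := ih _ a0 b hlen2 wglue
        refine ⟨q, hq, ?_, hqnd⟩
        simp at hql
        omega

theorem pv_nodup_bound {container : List (String × List String)} {a b : String} {q : List String}
    (hw : pvWL container a q b) (hnd : ((a :: q).dropLast).Nodup) : q.length ≤ container.length := by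
  have hsub : (a :: q).dropLast ⊆ container.map Prod.fst := fun y hy => pvWL_sources hw y hy
  have hlen : ((a :: q).dropLast).length ≤ (container.map Prod.fst).length :=
    (List.Nodup.subperm hnd hsub).length_le
  simp at hlen
  simpa using hlen

theorem pv_reach_of_wl {container : List (String × List String)} :
    ∀ (p : List String) (a b : String) (f : Nat), pvWL container a p b → p ≠ [] → p.length ≤ f →
      pvReachB container f a b = true := by
  intro p
  induction p with
  | nil => intro _ _ _ _ h; exact absurd rfl h
  | cons c rest ih =>
    intro a b f hw _ hl
    cases hw with
    | cons e w =>
      cases f with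
      | zero => simp at hl
      | succ f =>
        simp only [pvReachB, List.any_eq_true]
        refine ⟨c, e, ?_⟩
        cases rest with
        | nil =>
          have : c = b := pvWL_nil_eq w
          simp [this]
        | cons d rest' =>
          have : pvReachB container f c b = true := by
            refine ih c b f w (by simp) ?_
            simp at hl ⊢
            omega
          simp [this]

theorem pv_bridge {container : List (String × List String)} {s : String}
    (h : pvGoodB container s = true) : pvGoodS container s := by
  intro k hrt htg
  obtain ⟨p, hpne, hpw⟩ := pvWL_of_transGen htg
  obtain ⟨c, rest, rfl⟩ : ∃ c rest, p = c :: rest := by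
    cases p with
    | nil => exact absurd rfl hpne
    | cons c rest => exact ⟨c, rest, rfl⟩
  cases hpw with
  | cons e w =>
    have hk : k ∈ container.map Prod.fst := pv_key_of_edge e
    obtain ⟨q2, wq2, hlq2, hnd2⟩ := pv_shorten rest.length rest c k le_rfl w
    have hb2 : q2.length ≤ container.length := pv_nodup_bound wq2 hnd2
    have cyc : pvReachB container (container.length + 1) k k = true := by
      refine pv_reach_of_wl (c :: q2) k k _ (pvWL.cons e wq2) (by simp) ?_
      simp
      omega
    obtain ⟨r, wr⟩ := pvWL_of_reflTransGen hrt
    obtain ⟨r', wr', _, hndr⟩ := pv_shorten r.length r s k le_rfl wr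
    have hbr : r'.length ≤ container.length := pv_nodup_bound wr' hndr
    have hsk : (s == k || pvReachB container (container.length + 1) s k) = true := by
      cases hr' : r' with
      | nil =>
        have := pvWL_nil_eq (hr' ▸ wr')
        simp [this]
      | cons u r'' =>
        have : pvReachB container (container.length + 1) s k = true := by
          refine pv_reach_of_wl r' s k _ wr' (by simp [hr']) ?_
          omega
        simp [this]
    have hall := (List.all_eq_true.1 h) k hk
    rw [hsk, cyc] at hall
    simp at hall

-- ---------- the outer loop over container items ----------
theorem pv_outer {container : List (String × List String)} {sensor_oid : String}
    {admin_state_ids : List String} :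
    ∀ (items : List (String × List String)) (acc : List String),
      (∀ p ∈ items, sensor_oid ∈ p.2 →
        (if 1 < PySem.Set.len (PySem.Set.inter p.2 admin_state_ids)
         then pvGoodS container sensor_oid
         else ∀ s ∈ p.2, pvGoodS container s)) →
      (∀ p ∈ items, ∀ s ∈ p.2, s ∈ pvU container) →
      items.foldl
        (fun acc p =>
          if PySem.Set.contains p.2 sensor_oid then
            if 1 < PySem.Set.len (PySem.Set.inter p.2 admin_state_ids) then
              pvRunDfs container [sensor_oid] acc
            else
              pvRunDfs container p.2
                (PySem.Set.update acc (p.1.toList.map (fun ch => String.ofList [ch])))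
          else acc) acc
      = items.foldl
        (fun acc p =>
          if PySem.Set.contains p.2 sensor_oid then
            if 1 < PySem.Set.len (PySem.Set.inter p.2 admin_state_ids) then
              PySem.Set.update acc (pvClosA container (container.map Prod.fst) sensor_oid)
            else
              p.2.foldl (fun a s => PySem.Set.update a (pvClosA container (container.map Prod.fst) s))
                (PySem.Set.update acc (p.1.toList.map (fun ch => String.ofList [ch])))
          else acc) acc := by
  intro items
  induction items with
  | nil => intro acc _ _; rfl
  | cons p rest ih =>
    intro acc hP hUv
    have hPrest : ∀ p' ∈ rest, sensor_oid ∈ p'.2 →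
        (if 1 < PySem.Set.len (PySem.Set.inter p'.2 admin_state_ids)
         then pvGoodS container sensor_oid
         else ∀ s ∈ p'.2, pvGoodS container s) :=
      fun p' hp' => hP p' (List.mem_cons_of_mem _ hp')
    have hUrest : ∀ p' ∈ rest, ∀ s ∈ p'.2, s ∈ pvU container :=
      fun p' hp' => hUv p' (List.mem_cons_of_mem _ hp')
    simp only [List.foldl_cons]
    by_cases hin : PySem.Set.contains p.2 sensor_oid = true
    · have hmem : sensor_oid ∈ p.2 := (PySem.Set.contains_iff _ _).1 hin
      have hPp := hP p (by simp) hmem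
      have hUp : ∀ s ∈ p.2, s ∈ pvU container := hUv p (by simp)
      by_cases hlen : 1 < PySem.Set.len (PySem.Set.inter p.2 admin_state_ids)
      · rw [if_pos hlen] at hPp
        simp only [hin, if_true, if_pos hlen]
        rw [pv_entry [sensor_oid] acc (by simpa using hUp sensor_oid hmem)
          (by simpa using hPp), List.foldl_cons, List.foldl_nil]
        exact ih _ hPrest hUrest
      · rw [if_neg hlen] at hPp
        simp only [hin, if_true, if_neg hlen]
        rw [pv_entry p.2 _ hUp hPp]
        exact ih _ hPrest hUrest
    · rw [if_neg hin, if_neg hin]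
      exact ih _ hPrest hUrest

-- ===== VERDICT (by name: the statement is the Claim_ definition above) =====
theorem get_contained_sensor_ids_py_spec : Claim_equal_get_contained_sensor_ids_py := by
  unfold Claim_equal_get_contained_sensor_ids_py
  intro sensor_oid admin_state_ids container _ hPre
  unfold Spec_get_contained_sensor_ids_py
  unfold get_contained_sensor_ids_py get_contained_sensor_ids_py_alt
  refine (pv_outer (PySem.Dict.ofList container).items PySem.Set.empty ?_ ?_).symm
  · intro p hp hmem
    have hthis := hPre p hp hmem
    split
    · rename_i hlen
      rw [if_pos hlen] at hthis
      exact pv_bridge hthis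
    · rename_i hlen
      rw [if_neg hlen] at hthis
      exact fun s hs => pv_bridge (hthis s hs)
  · intro p hp s hs
    exact pv_val_sub_U hp hs
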